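-- pv_equiv track=rewrite | github.com/DeluxeAlonso/flight-delay-predictor | Models/Weather.py | process_code_sum
-- ===== SOURCE A (Python) =====
-- def process_code_sum(code_sum):
--     codes = []
--     code_array = ' '.join(code_sum.split())
--     code_array = code_array.split(' ')
--     for i in range(len(code_array)):
--         if len(code_array[i]) == 4:
--             codes.append(code_array[i][:2])
--             codes.append(code_array[i][2:4])
--         else:
--             codes.append(code_array[i])
--     return ' '.join(codes)
-- ===== SOURCE B (Python) =====
-- def process_code_sum(code_sum):
--     # single character-level pass: accumulate non-whitespace runs, flush each
--     # run at a whitespace boundary (sentinel space flushes the last run),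
--     # splitting 4-character runs into their two halves
--     out = []
--     cur = []
--     for ch in code_sum + ' ':
--         if ch in ' \t\n\r\x0b\x0c':
--             if cur:
--                 if len(cur) == 4:
--                     out.append(''.join(cur[:2]))
--                     out.append(''.join(cur[2:]))
--                 else:
--                     out.append(''.join(cur))
--                 cur = []
--         else:
--             cur.append(ch)
--     return ' '.join(out)
-- ===== Notes on version B (the rewrite author's own statement) =====
-- stated objective: alternative
-- what changed: Replaces A's split/rejoin/re-split pipeline and index loop over tokens with a single character-level scan that accumulates non-whitespace runs and flushes each run (halving length-4 runs) at whitespace boundaries.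
import Mathlib
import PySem

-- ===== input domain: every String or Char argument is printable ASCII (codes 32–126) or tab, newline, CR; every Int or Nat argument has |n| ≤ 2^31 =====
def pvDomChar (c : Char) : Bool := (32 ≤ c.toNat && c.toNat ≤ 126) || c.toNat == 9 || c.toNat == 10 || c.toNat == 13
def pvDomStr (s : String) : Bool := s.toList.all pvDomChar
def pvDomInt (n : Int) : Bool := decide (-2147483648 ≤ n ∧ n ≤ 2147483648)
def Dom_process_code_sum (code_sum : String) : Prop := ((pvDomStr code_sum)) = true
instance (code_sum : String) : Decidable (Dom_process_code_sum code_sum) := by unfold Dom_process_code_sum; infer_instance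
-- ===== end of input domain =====

-- B replaces A's split/rejoin/re-split pipeline and index loop over tokens with a
-- single character-level scan (alternative decomposition, same O(n) cost).

-- ===== PORT A =====
def process_code_sum (code_sum : String) : String :=
  -- codes = []
  -- code_array = ' '.join(code_sum.split()); code_array = code_array.split(' ')
  let code_array := PySem.Str.join " " (PySem.Str.split₀ code_sum)
  let code_array := (PySem.Str.split? code_array " ").getD []   -- sep " " nonempty: never none
  -- for i in range(len(code_array)): …
  let codes := (PySem.List.pyRange 0 (PySem.List.len code_array) 1).foldl
    (fun codes i =>
      if PySem.Str.len (PySem.List.pyGetD code_array i "") = 4 then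
        codes ++ [PySem.Str.slice (PySem.List.pyGetD code_array i "") none (some 2),
                  PySem.Str.slice (PySem.List.pyGetD code_array i "") (some 2) (some 4)]
      else
        codes ++ [PySem.List.pyGetD code_array i ""]) []
  PySem.Str.join " " codes

-- ===== PORT B =====
-- whitespace characters of B's literal ' \t\n\r\x0b\x0c'
def pvWs : List Char := [' ', '\t', '\n', '\r', '\u000b', '\u000c']

-- the pieces emitted when a run `cur` is flushed
def pvPieces (cur : List Char) : List String :=
  if cur.length = 4 then
    [String.ofList (PySem.List.slice cur none (some 2)),
     String.ofList (PySem.List.slice cur (some 2) none)]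
  else
    [String.ofList cur]

def pvStep (st : List String × List Char) (ch : Char) : List String × List Char :=
  if pvWs.contains ch then
    if st.2.isEmpty then st else (st.1 ++ pvPieces st.2, [])
  else
    (st.1, st.2 ++ [ch])

def process_code_sum_alt (code_sum : String) : String :=
  PySem.Str.join " " ((code_sum.toList ++ [' ']).foldl pvStep ([], [])).1

-- ===== PRECONDITION & SPEC =====
def Spec_process_code_sum (code_sum : String) (out : String) : Prop := out = process_code_sum_alt code_sum
instance (code_sum : String) (out : String) : Decidable (Spec_process_code_sum code_sum out) := by unfold Spec_process_code_sum; infer_instance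

-- ===== CLAIM (what is proved, stated in full; the proofs are below) =====
def Claim_equal_process_code_sum : Prop := ∀ (code_sum : String), Dom_process_code_sum code_sum → Spec_process_code_sum code_sum (process_code_sum code_sum)

-- ===== LEMMAS AND PROOFS =====

-- on domain characters, membership in B's whitespace literal is Python's str.isspace
lemma pvWs_eq_isspace (c : Char) (h : pvDomChar c = true) :
    pvWs.contains c = PySem.Chars.isspace c := by
  have hofn : ∀ n : Nat, c.toNat = n → c = Char.ofNat n := by
    intro n hn; rw [← hn, Char.ofNat_toNat]
  have hmem : (pvWs.contains c = true) ↔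
      (c.toNat = 32 ∨ c.toNat = 9 ∨ c.toNat = 10 ∨ c.toNat = 13 ∨ c.toNat = 11 ∨ c.toNat = 12) := by
    constructor
    · intro hc
      simp only [pvWs, List.contains_eq_mem, decide_eq_true_eq, List.mem_cons,
        List.not_mem_nil, or_false] at hc
      rcases hc with rfl | rfl | rfl | rfl | rfl | rfl <;> simp
    · intro hc
      rcases hc with hc | hc | hc | hc | hc | hc <;> rw [hofn _ hc] <;> decide
  simp only [pvDomChar, Bool.or_eq_true, Bool.and_eq_true, decide_eq_true_eq, beq_iff_eq] at h
  rw [Bool.eq_iff_iff, hmem]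
  simp only [PySem.Chars.isspace, Bool.or_eq_true, Bool.and_eq_true, decide_eq_true_eq]
  omega

-- split₀.go accumulates into acc
lemma pv_split₀go_acc (rest : List Char) : ∀ (cur : List Char) (acc : List (List Char)),
    PySem.Chars.split₀.go rest cur acc = acc.reverse ++ PySem.Chars.split₀.go rest cur [] := by
  induction rest with
  | nil =>
    intro cur acc
    simp only [PySem.Chars.split₀.go]
    by_cases hcur : cur.isEmpty = true
    · rw [if_pos hcur, if_pos hcur]; simp
    · rw [if_neg hcur, if_neg hcur]; simp
  | cons c rest ih =>
    intro cur acc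
    simp only [PySem.Chars.split₀.go]
    by_cases hc : PySem.Chars.isspace c = true
    · rw [if_pos hc, if_pos hc]
      by_cases hcur : cur.isEmpty = true
      · rw [if_pos hcur, if_pos hcur]; exact ih [] acc
      · rw [if_neg hcur, if_neg hcur, ih [] (cur.reverse :: acc), ih [] [cur.reverse]]
        simp
    · rw [if_neg hc, if_neg hc]; exact ih (c :: cur) acc

-- every token produced by split₀.go is nonempty and whitespace-free
lemma pv_split₀go_props (rest : List Char) : ∀ (cur : List Char) (acc : List (List Char)),
    (∀ c ∈ cur, PySem.Chars.isspace c = false) →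
    (∀ t ∈ acc, t ≠ [] ∧ ∀ c ∈ t, PySem.Chars.isspace c = false) →
    ∀ t ∈ PySem.Chars.split₀.go rest cur acc, t ≠ [] ∧ ∀ c ∈ t, PySem.Chars.isspace c = false := by
  induction rest with
  | nil =>
    intro cur acc hcur hacc t ht
    simp only [PySem.Chars.split₀.go] at ht
    by_cases hc : cur.isEmpty = true
    · rw [if_pos hc] at ht
      exact hacc t (by simpa using ht)
    · rw [if_neg hc] at ht
      simp only [List.reverse_cons, List.mem_append, List.mem_reverse,
        List.mem_singleton] at ht
      rcases ht with ht | rfl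
      · exact hacc t (by simpa using ht)
      · refine ⟨?_, fun ch hch => hcur ch (by simpa using hch)⟩
        simp only [List.isEmpty_iff] at hc
        simpa using hc
  | cons c rest ih =>
    intro cur acc hcur hacc t ht
    simp only [PySem.Chars.split₀.go] at ht
    by_cases hc : PySem.Chars.isspace c = true
    · rw [if_pos hc] at ht
      by_cases he : cur.isEmpty = true
      · rw [if_pos he] at ht
        exact ih [] acc (by simp) hacc t ht
      · rw [if_neg he] at ht
        refine ih [] (cur.reverse :: acc) (by simp) ?_ t ht
        intro u hu
        rcases List.mem_cons.mp hu with rfl | hu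
        · refine ⟨?_, fun ch hch => hcur ch (by simpa using hch)⟩
          simp only [List.isEmpty_iff] at he
          simpa using he
        · exact hacc u hu
    · rw [if_neg hc] at ht
      refine ih (c :: cur) acc ?_ hacc t ht
      intro ch hch
      rcases List.mem_cons.mp hch with rfl | hch
      · simpa using hc
      · exact hcur ch hch

-- B's fold computes the flattened pieces of split₀.go
lemma pv_bfold (rest : List Char) : ∀ (r : List Char) (out : List String),
    (∀ c ∈ rest, pvDomChar c = true) →
    (∀ c ∈ r, PySem.Chars.isspace c = false) →
    ((rest ++ [' ']).foldl pvStep (out, r.reverse)).1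
      = out ++ (PySem.Chars.split₀.go rest r []).flatMap pvPieces := by
  induction rest with
  | nil =>
    intro r out _ _
    have hws : ' ' ∈ pvWs := by decide
    cases r with
    | nil => simp [pvStep, PySem.Chars.split₀.go, hws]
    | cons a r' => simp [pvStep, PySem.Chars.split₀.go, hws, List.isEmpty_iff]
  | cons c rest ih =>
    intro r out hdom hr
    have hdc : pvDomChar c = true := hdom c (by simp)
    have hdrest : ∀ x ∈ rest, pvDomChar x = true := fun x hx => hdom x (by simp [hx])
    simp only [List.cons_append, List.foldl_cons]
    by_cases hc : PySem.Chars.isspace c = true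
    · have hw : pvWs.contains c = true := by rw [pvWs_eq_isspace c hdc]; exact hc
      have hwm : c ∈ pvWs := by simpa using hw
      cases r with
      | nil =>
        have hstep : pvStep (out, ([] : List Char).reverse) c = (out, ([] : List Char).reverse) := by
          simp [pvStep, hwm]
        rw [hstep, ih [] out hdrest (by simp)]
        simp only [PySem.Chars.split₀.go, hc, if_pos, List.isEmpty_nil]
      | cons a r' =>
        have hstep : pvStep (out, (a :: r').reverse) c = (out ++ pvPieces ((a :: r').reverse), ([] : List Char).reverse) := by
          simp [pvStep, hwm, List.isEmpty_iff]
        rw [hstep, ih [] (out ++ pvPieces ((a :: r').reverse)) hdrest (by simp)]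
        have hgo : PySem.Chars.split₀.go (c :: rest) (a :: r') []
            = [(a :: r').reverse] ++ PySem.Chars.split₀.go rest [] [] := by
          simp only [PySem.Chars.split₀.go]
          rw [if_pos hc, if_neg (by simp)]
          rw [pv_split₀go_acc rest [] [(a :: r').reverse]]
          simp
        rw [hgo]
        simp
    · have hw : pvWs.contains c = false := by
        rw [pvWs_eq_isspace c hdc]; simpa using hc
      have hwn : c ∉ pvWs := by simpa using hw
      have hstep : pvStep (out, r.reverse) c = (out, (c :: r).reverse) := by
        simp [pvStep, hwn]
      rw [hstep, ih (c :: r) out hdrest ?_]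
      · have hgo : PySem.Chars.split₀.go (c :: rest) r []
            = PySem.Chars.split₀.go rest (c :: r) [] := by
          simp only [PySem.Chars.split₀.go]
          rw [if_neg hc]
        rw [hgo]
      · intro x hx
        rcases List.mem_cons.mp hx with rfl | hx
        · simpa using hc
        · exact hr x hx

-- ' '.join of parts, flattened form
lemma pv_join_cons (ts : List (List Char)) : ∀ (t : List Char),
    PySem.Chars.join [' '] (t :: ts) = t ++ ts.flatMap (fun u => ' ' :: u) := by
  induction ts with
  | nil => intro t; simp [PySem.Chars.join_singleton]
  | cons u ts ih =>
    intro t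
    rw [PySem.Chars.join_cons_cons, ih u]
    simp

-- splitting the join back apart
lemma pv_splitOn_go_join (fuel : Nat) : ∀ (toks : List (List Char)) (t0 cur : List Char) (acc : List (List Char)),
    (∀ c ∈ t0, c ≠ ' ') → (∀ t ∈ toks, ∀ c ∈ t, c ≠ ' ') →
    (t0 ++ toks.flatMap (fun t => ' ' :: t)).length < fuel →
    PySem.Chars.splitOn.go [' '] fuel (t0 ++ toks.flatMap (fun t => ' ' :: t)) cur acc
      = acc.reverse ++ (cur.reverse ++ t0) :: toks := by
  induction fuel with
  | zero =>
    intro toks t0 cur acc _ _ hlen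
    exact absurd hlen (Nat.not_lt_zero _)
  | succ fuel ih =>
    intro toks t0 cur acc h0 htoks hlen
    cases t0 with
    | cons c t0' =>
      have hc : c ≠ ' ' := h0 c (by simp)
      simp only [List.cons_append]
      simp only [PySem.Chars.splitOn.go]
      rw [if_neg (by simp [List.isPrefixOf]; exact fun h => (hc h.symm).elim)]
      rw [ih toks t0' (c :: cur) acc (fun x hx => h0 x (by simp [hx])) htoks
        (by simp only [List.cons_append, List.length_cons] at hlen; omega)]
      simp
    | nil =>
      cases toks with
      | nil =>
        simp only [List.nil_append, List.flatMap_nil]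
        simp only [PySem.Chars.splitOn.go]
        simp
      | cons t1 ts =>
        simp only [List.nil_append, List.flatMap_cons, List.cons_append]
        simp only [PySem.Chars.splitOn.go]
        rw [if_pos (by simp [List.isPrefixOf])]
        have hlen' : (t1 ++ ts.flatMap (fun t => ' ' :: t)).length < fuel := by
          simp only [List.nil_append, List.flatMap_cons, List.cons_append, List.length_cons] at hlen
          simpa using Nat.lt_of_succ_lt_succ hlen
        have := ih ts t1 [] (cur.reverse :: acc) (htoks t1 (by simp))
          (fun t ht => htoks t (by simp [ht])) hlen'
        simp only [List.length_cons, List.length_nil, List.drop_succ_cons, List.drop_zero]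
        rw [this]
        simp

lemma pv_splitOn_join (t0 : List Char) (toks : List (List Char))
    (h0 : ∀ c ∈ t0, c ≠ ' ') (h : ∀ t ∈ toks, ∀ c ∈ t, c ≠ ' ') :
    PySem.Chars.splitOn (PySem.Chars.join [' '] (t0 :: toks)) [' '] = t0 :: toks := by
  unfold PySem.Chars.splitOn
  rw [pv_join_cons toks t0]
  rw [pv_splitOn_go_join ((t0 ++ toks.flatMap (fun t => ' ' :: t)).length + 1) toks t0 [] []
    h0 h (by omega)]
  simp

-- the loop body of A, as a flatMap
lemma pv_foldl_if_append {α β : Type} (l : List α) (p : α → Prop) [DecidablePred p]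
    (f g : α → List β) (a : List β) :
    l.foldl (fun acc x => if p x then acc ++ f x else acc ++ g x) a
      = a ++ l.flatMap (fun x => if p x then f x else g x) := by
  have hfun : (fun (acc : List β) (x : α) => if p x then acc ++ f x else acc ++ g x)
      = fun acc x => acc ++ (if p x then f x else g x) := by
    funext acc x; split <;> rfl
  rw [hfun, PySem.List.foldl_append_eq_flatMap]

-- A's per-token pieces agree with B's
lemma pv_pieces_agree (t : List Char) :
    (if PySem.Str.len (String.ofList t) = 4 then
        [PySem.Str.slice (String.ofList t) none (some 2),
         PySem.Str.slice (String.ofList t) (some 2) (some 4)]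
      else [String.ofList t]) = pvPieces t := by
  simp only [pvPieces, PySem.Str.len, String.toList_ofList, PySem.Str.slice,
    PySem.Chars.slice_eq_listSlice]
  by_cases h4 : t.length = 4
  · rw [if_pos (by exact_mod_cast h4), if_pos h4]
    have h24 : PySem.List.slice t (some 2) (some 4) = List.drop 2 t := by
      match t, h4 with
      | [a, b, c, d], _ => rfl
    have h2n : PySem.List.slice t (some 2) none = List.drop 2 t := by
      match t, h4 with
      | [a, b, c, d], _ => rfl
    rw [h24, h2n]
  · rw [if_neg (fun hh => h4 (by exact_mod_cast hh)), if_neg h4]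

-- (map ofList) then A's loop body = B's pieces
lemma pv_flatMap_pieces (l : List (List Char)) :
    (l.map String.ofList).flatMap
        (fun u => if PySem.Str.len u = 4 then
            [PySem.Str.slice u none (some 2), PySem.Str.slice u (some 2) (some 4)]
          else [u])
      = l.flatMap pvPieces := by
  induction l with
  | nil => rfl
  | cons x xs ih =>
    simp only [List.map_cons, List.flatMap_cons, ih, pv_pieces_agree]

-- ===== VERDICT (by name: the statement is the Claim_ definition above) =====
theorem process_code_sum_spec : Claim_equal_process_code_sum := by
  intro s hdom
  show process_code_sum s = process_code_sum_alt s
  have hdomchars : ∀ c ∈ s.toList, pvDomChar c = true := by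
    have h := hdom
    unfold Dom_process_code_sum pvDomStr at h
    simpa [List.all_eq_true] using h
  -- B side: the fold flushes exactly the pieces of split₀'s tokens
  have hB : process_code_sum_alt s
      = PySem.Str.join " " ((PySem.Chars.split₀ s.toList).flatMap pvPieces) := by
    unfold process_code_sum_alt
    have hb := pv_bfold s.toList [] [] hdomchars (by simp)
    simp only [List.reverse_nil] at hb
    rw [hb]
    simp only [List.nil_append]
    rfl
  rw [hB]
  have hgo : PySem.Chars.split₀.go s.toList [] [] = PySem.Chars.split₀ s.toList := rfl
  have hprops := pv_split₀go_props s.toList [] [] (by simp) (by simp)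
  rw [hgo] at hprops
  simp only [process_code_sum]
  cases htoks : PySem.Chars.split₀ s.toList with
  | nil =>
    have hs0 : PySem.Str.split₀ s = [] := by
      unfold PySem.Str.split₀
      rw [htoks]; rfl
    rw [hs0]
    decide
  | cons t ts =>
    rw [htoks] at hprops
    have hns : ∀ u ∈ t :: ts, ∀ c ∈ u, c ≠ ' ' := by
      intro u hu c hc he
      have hp := (hprops u hu).2 c hc
      rw [he] at hp
      exact absurd hp (by decide)
    have hjoin_toList : (PySem.Str.join " " (PySem.Str.split₀ s)).toList
        = PySem.Chars.join [' '] (t :: ts) := by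
      rw [PySem.Str.toList_join]
      rw [PySem.Str.split₀_map_toList, htoks]
      rfl
    have hsplit : PySem.Chars.split? (PySem.Str.join " " (PySem.Str.split₀ s)).toList (" ".toList)
        = some (t :: ts) := by
      rw [hjoin_toList]
      rw [show (" ".toList) = [' '] from rfl]
      unfold PySem.Chars.split?
      rw [if_neg (by simp)]
      rw [pv_splitOn_join t ts (hns t (by simp)) (fun u hu => hns u (by simp [hu]))]
    have hca : (PySem.Str.split? (PySem.Str.join " " (PySem.Str.split₀ s)) " ").getD []
        = (t :: ts).map String.ofList := by
      unfold PySem.Str.split?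
      rw [hsplit]
      rfl
    rw [hca]
    have hfold := PySem.List.foldl_pyRange_zero_pyGetD ((t :: ts).map String.ofList) ""
      (fun codes u => if PySem.Str.len u = 4 then
          codes ++ [PySem.Str.slice u none (some 2), PySem.Str.slice u (some 2) (some 4)]
        else codes ++ [u]) []
    simp only [] at hfold
    rw [hfold]
    have h2 := pv_foldl_if_append ((t :: ts).map String.ofList)
      (fun u => PySem.Str.len u = 4)
      (fun u => [PySem.Str.slice u none (some 2), PySem.Str.slice u (some 2) (some 4)])
      (fun u => [u]) []
    simp only [] at h2
    rw [h2]
    rw [List.nil_append, pv_flatMap_pieces]
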